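-- pv_equiv track=rewrite | github.com/melonxi/travel_agent_pro | backend/tools/plan_tools/phase3_tools.py | _validated_skeleton_id_map
-- ===== SOURCE A (Python) =====
-- def _validated_skeleton_id_map(
--     skeleton_plans: list[object],
-- ) -> tuple[dict[str, str], set[str]]:
--     valid_ids: dict[str, str] = {}
--     colliding_ids: set[str] = set()
--     for item in skeleton_plans:
--         if not isinstance(item, dict):
--             continue
--         skeleton_id = item.get("id")
--         if isinstance(skeleton_id, str) and skeleton_id.strip():
--             normalized_id = skeleton_id.strip()
--             existing_raw_id = valid_ids.get(normalized_id)
--             if existing_raw_id is None: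
--                 valid_ids[normalized_id] = skeleton_id
--             else:
--                 colliding_ids.add(normalized_id)
--     return valid_ids, colliding_ids
-- ===== SOURCE B (Python) =====
-- def _validated_skeleton_id_map(
--     skeleton_plans: list[object],
-- ) -> tuple[dict[str, str], set[str]]:
--     # Pass 1: filter to (normalized, raw) pairs for dict items with a usable id.
--     pairs = [
--         (item["id"].strip(), item["id"])
--         for item in skeleton_plans
--         if isinstance(item, dict)
--         and isinstance(item.get("id"), str)
--         and item.get("id").strip()
--     ]
--     # Pass 2: first raw value per normalized key.
--     valid_ids: dict[str, str] = {}
--     for norm, raw in pairs: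
--         valid_ids.setdefault(norm, raw)
--     # Pass 3: count occurrences; a key collides when its count reaches 2.
--     counts: dict[str, int] = {}
--     colliding = []
--     for norm, _ in pairs:
--         counts[norm] = counts.get(norm, 0) + 1
--         if counts[norm] == 2:
--             colliding.append(norm)
--     return valid_ids, set(colliding)
-- ===== Notes on version B (the rewrite author's own statement) =====
-- stated objective: idiomatic
-- what changed: Replaces the single on-the-fly loop (dict lookup doubling as both validity map and collision detector) by a filter-first decomposition: one comprehension builds the (normalized, raw) pairs, then separate passes build valid_ids via setdefault and colliding via an occurrence counter.
import Mathlib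
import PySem

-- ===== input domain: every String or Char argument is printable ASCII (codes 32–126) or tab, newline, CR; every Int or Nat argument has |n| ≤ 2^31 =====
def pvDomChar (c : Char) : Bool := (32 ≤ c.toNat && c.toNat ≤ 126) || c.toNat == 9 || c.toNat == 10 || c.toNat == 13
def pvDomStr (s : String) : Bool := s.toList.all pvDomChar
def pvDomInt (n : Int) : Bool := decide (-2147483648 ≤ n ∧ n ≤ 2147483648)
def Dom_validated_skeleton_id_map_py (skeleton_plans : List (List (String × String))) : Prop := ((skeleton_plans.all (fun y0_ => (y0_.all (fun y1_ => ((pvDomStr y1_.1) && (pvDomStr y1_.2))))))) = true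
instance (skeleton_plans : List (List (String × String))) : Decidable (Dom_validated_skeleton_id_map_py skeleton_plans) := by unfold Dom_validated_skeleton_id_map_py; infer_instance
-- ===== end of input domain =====

-- B replaces A's single on-the-fly loop by a filter-first decomposition (pairs comprehension,
-- then a setdefault pass for the map and a counting pass for collisions); same cost, more idiomatic.


-- ===== PORT A =====
-- A's loop body; items are dicts by the type convention (the isinstance test is always true),
-- item.get("id") is Dict.get? on the dict built from the item's pairs.
def pvStepA (st : PySem.Dict String String × PySem.Set String)
    (item : List (String × String)) : PySem.Dict String String × PySem.Set String :=
  match (PySem.Dict.ofList item).get? "id" with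
  | none => st
  | some skeleton_id =>
    if PySem.Str.strip skeleton_id ≠ "" then
      let normalized_id := PySem.Str.strip skeleton_id
      match st.1.get? normalized_id with
      | none => (st.1.insert normalized_id skeleton_id, st.2)
      | some _ => (st.1, PySem.Set.add st.2 normalized_id)
    else st

def validated_skeleton_id_map_py (skeleton_plans : List (List (String × String))) : (List (String × String)) × List String :=
  ((skeleton_plans.foldl pvStepA (PySem.Dict.empty, PySem.Set.empty)).1.items,
   (skeleton_plans.foldl pvStepA (PySem.Dict.empty, PySem.Set.empty)).2)

-- ===== PORT B =====
-- Pass 1 of Source B: the comprehension producing the (normalized, raw) pairs.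
def pvPairs (skeleton_plans : List (List (String × String))) : List (String × String) :=
  skeleton_plans.filterMap (fun item =>
    match (PySem.Dict.ofList item).get? "id" with
    | some raw => if PySem.Str.strip raw ≠ "" then some (PySem.Str.strip raw, raw) else none
    | none => none)

-- Pass 3 of Source B: one counting step (counts[norm] = counts.get(norm, 0) + 1; append when it reaches 2).
def pvStepCount (st : PySem.Dict String Int × List String) (p : String × String) :
    PySem.Dict String Int × List String :=
  let c := st.1.insert p.1 (st.1.getD p.1 0 + 1)
  if c.getD p.1 0 == 2 then (c, st.2 ++ [p.1]) else (c, st.2)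

def validated_skeleton_id_map_py_alt (skeleton_plans : List (List (String × String))) : (List (String × String)) × List String :=
  (((pvPairs skeleton_plans).foldl (fun d p => d.setdefault p.1 p.2) PySem.Dict.empty).items,
   PySem.Set.ofList ((pvPairs skeleton_plans).foldl pvStepCount (PySem.Dict.empty, [])).2)

-- ===== PRECONDITION & SPEC =====
def Spec_validated_skeleton_id_map_py (skeleton_plans : List (List (String × String))) (out : (List (String × String)) × List String) : Prop := out = validated_skeleton_id_map_py_alt skeleton_plans
instance (skeleton_plans : List (List (String × String))) (out : (List (String × String)) × List String) : Decidable (Spec_validated_skeleton_id_map_py skeleton_plans out) := by unfold Spec_validated_skeleton_id_map_py; infer_instance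

-- ===== CLAIM (what is proved, stated in full; the proofs are below) =====
def Claim_equal_validated_skeleton_id_map_py : Prop := ∀ (skeleton_plans : List (List (String × String))), Dom_validated_skeleton_id_map_py skeleton_plans → Spec_validated_skeleton_id_map_py skeleton_plans (validated_skeleton_id_map_py skeleton_plans)

-- ===== LEMMAS AND PROOFS =====

-- A's per-pair step, once the skipped items are removed.
def pvStepP (st : PySem.Dict String String × PySem.Set String) (p : String × String) :
    PySem.Dict String String × PySem.Set String :=
  match st.1.get? p.1 with
  | none => (st.1.insert p.1 p.2, st.2)
  | some _ => (st.1, PySem.Set.add st.2 p.1)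

-- A's loop over the items IS the loop of pvStepP over B's pairs: skipped items are identity steps.
theorem pvFoldA_eq_foldP (sp : List (List (String × String)))
    (st : PySem.Dict String String × PySem.Set String) :
    sp.foldl pvStepA st = (pvPairs sp).foldl pvStepP st := by
  induction sp generalizing st with
  | nil => rfl
  | cons item rest ih =>
    simp only [List.foldl_cons, pvPairs, List.filterMap_cons]
    cases h : (PySem.Dict.ofList item).get? "id" with
    | none =>
      have hA : pvStepA st item = st := by simp [pvStepA, h]
      rw [hA]
      simp only []
      simpa [pvPairs] using ih st
    | some raw =>
      simp only []
      by_cases hs : PySem.Str.strip raw = ""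
      · have hA : pvStepA st item = st := by simp [pvStepA, h, hs]
        rw [hA, if_neg (not_not_intro hs)]
        simpa [pvPairs] using ih st
      · have hA : pvStepA st item = pvStepP st (PySem.Str.strip raw, raw) := by
          simp [pvStepA, pvStepP, h, hs]
        rw [hA, if_pos hs]
        simpa [pvPairs] using ih (pvStepP st (PySem.Str.strip raw, raw))

-- The coupling invariant between A's state (dict, set) and B's two separate folds:
-- a key is in the dict iff its count so far is ≥ 1, and in the collision set iff it is ≥ 2.
theorem pvCoupling (pairs : List (String × String))
    (d : PySem.Dict String String) (cnt : PySem.Dict String Int) (s : PySem.Set String)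
    (h0 : ∀ k, 0 ≤ cnt.getD k 0)
    (h1 : ∀ k, (d.get? k).isSome = true ↔ 1 ≤ cnt.getD k 0)
    (h2 : ∀ k, k ∈ s ↔ 2 ≤ cnt.getD k 0) :
    pairs.foldl pvStepP (d, s) =
      (pairs.foldl (fun d p => d.setdefault p.1 p.2) d, (pairs.foldl pvStepCount (cnt, s)).2) := by
  induction pairs generalizing d cnt s with
  | nil => rfl
  | cons p rest ih =>
    obtain ⟨n, r⟩ := p
    simp only [List.foldl_cons]
    have hc0 := h0 n
    cases hd : d.get? n with
    | none =>
      have hcnt : cnt.getD n 0 = 0 := by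
        have := (h1 n).not
        simp [hd] at this
        omega
      have hcont : d.contains n = false := by
        rw [PySem.Dict.contains_eq_isSome_get?, hd]; rfl
      have hstepP : pvStepP (d, s) (n, r) = (d.insert n r, s) := by simp [pvStepP, hd]
      have hsd : d.setdefault n r = d.insert n r := PySem.Dict.setdefault_of_not_contains d r hcont
      have hstepC : pvStepCount (cnt, s) (n, r) = (cnt.insert n (cnt.getD n 0 + 1), s) := by
        simp [pvStepCount, PySem.Dict.getD_insert_self, hcnt]
      rw [hstepP, hsd, hstepC]
      refine ih (d.insert n r) (cnt.insert n (cnt.getD n 0 + 1)) s ?_ ?_ ?_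
      · intro k
        rw [PySem.Dict.getD_insert]
        split_ifs with hk
        · omega
        · exact h0 k
      · intro k
        rw [PySem.Dict.get?_insert, PySem.Dict.getD_insert]
        split_ifs with hk
        · simp; omega
        · exact h1 k
      · intro k
        rw [PySem.Dict.getD_insert]
        split_ifs with hk
        · subst hk
          have : ¬ k ∈ s := by rw [h2 k]; omega
          simp [this]; omega
        · exact h2 k
    | some v =>
      have hcnt : 1 ≤ cnt.getD n 0 := (h1 n).mp (by simp [hd])
      have hcont : d.contains n = true := by
        rw [PySem.Dict.contains_eq_isSome_get?, hd]; rfl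
      have hstepP : pvStepP (d, s) (n, r) = (d, PySem.Set.add s n) := by simp [pvStepP, hd]
      have hsd : d.setdefault n r = d := PySem.Dict.setdefault_of_contains d r hcont
      rw [hstepP, hsd]
      by_cases h2n : cnt.getD n 0 = 1
      · -- second occurrence: both sides append n
        have hnmem : n ∉ s := by rw [h2 n]; omega
        have hadd : PySem.Set.add s n = s ++ [n] := PySem.Set.add_of_not_mem hnmem
        have hstepC : pvStepCount (cnt, s) (n, r) = (cnt.insert n (cnt.getD n 0 + 1), s ++ [n]) := by
          simp [pvStepCount, PySem.Dict.getD_insert_self, h2n]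
        rw [hadd, hstepC]
        refine ih d (cnt.insert n (cnt.getD n 0 + 1)) (s ++ [n]) ?_ ?_ ?_
        · intro k
          rw [PySem.Dict.getD_insert]
          split_ifs with hk
          · omega
          · exact h0 k
        · intro k
          rw [PySem.Dict.getD_insert]
          split_ifs with hk
          · subst hk; simp [hd]; omega
          · exact h1 k
        · intro k
          rw [PySem.Dict.getD_insert]
          simp only [List.mem_append, List.mem_singleton]
          split_ifs with hk
          · subst hk; simp; omega
          · rw [h2 k]
            constructor
            · rintro (hks | rfl)
              · exact hks
              · exact absurd rfl hk
            · intro hks; exact Or.inl hks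
      · -- third or later occurrence: both sides leave the set unchanged
        have hmem : n ∈ s := by rw [h2 n]; omega
        have hadd : PySem.Set.add s n = s := PySem.Set.add_of_mem hmem
        have hstepC : pvStepCount (cnt, s) (n, r) = (cnt.insert n (cnt.getD n 0 + 1), s) := by
          have : ¬ (cnt.getD n 0 + 1 = 2) := by omega
          simp [pvStepCount, PySem.Dict.getD_insert_self, this]
        rw [hadd, hstepC]
        refine ih d (cnt.insert n (cnt.getD n 0 + 1)) s ?_ ?_ ?_
        · intro k
          rw [PySem.Dict.getD_insert]
          split_ifs with hk
          · omega
          · exact h0 k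
        · intro k
          rw [PySem.Dict.getD_insert]
          split_ifs with hk
          · subst hk; simp [hd]; omega
          · exact h1 k
        · intro k
          rw [PySem.Dict.getD_insert]
          split_ifs with hk
          · subst hk; rw [h2 k]; omega
          · exact h2 k

-- pvStepP only ever changes the set component by Set.add, so it stays duplicate-free.
theorem pvNodupSndP (pairs : List (String × String))
    (st : PySem.Dict String String × PySem.Set String) (h : st.2.Nodup) :
    (pairs.foldl pvStepP st).2.Nodup := by
  induction pairs generalizing st with
  | nil => exact h
  | cons p rest ih =>
    simp only [List.foldl_cons]
    apply ih
    unfold pvStepP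
    cases st.1.get? p.1 with
    | none => exact h
    | some _ =>
      apply PySem.Set.nodup_add
      exact h

-- ===== VERDICT (by name: the statement is the Claim_ definition above) =====
theorem validated_skeleton_id_map_py_spec : Claim_equal_validated_skeleton_id_map_py := by
  intro sp _
  show validated_skeleton_id_map_py sp = validated_skeleton_id_map_py_alt sp
  have hcoup := pvCoupling (pvPairs sp) PySem.Dict.empty PySem.Dict.empty ([] : List String)
    (by intro k; simp [PySem.Dict.getD_empty])
    (by intro k; simp [PySem.Dict.get?_empty, PySem.Dict.getD_empty])
    (by intro k; simp [PySem.Dict.getD_empty])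
  have hsnd : ((pvPairs sp).foldl pvStepP (PySem.Dict.empty, ([] : List String))).2
      = ((pvPairs sp).foldl pvStepCount (PySem.Dict.empty, ([] : List String))).2 :=
    congrArg Prod.snd hcoup
  have hn : ((pvPairs sp).foldl pvStepCount (PySem.Dict.empty, ([] : List String))).2.Nodup := by
    rw [← hsnd]
    exact pvNodupSndP (pvPairs sp) (PySem.Dict.empty, []) List.nodup_nil
  show (((sp.foldl pvStepA (PySem.Dict.empty, ([] : List String)))).1.items,
        ((sp.foldl pvStepA (PySem.Dict.empty, ([] : List String)))).2)
     = (((pvPairs sp).foldl (fun d p => d.setdefault p.1 p.2) PySem.Dict.empty).items,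
        PySem.Set.ofList ((pvPairs sp).foldl pvStepCount (PySem.Dict.empty, ([] : List String))).2)
  rw [pvFoldA_eq_foldP, hcoup]
  simp only []
  exact congrArg _ (PySem.Set.ofList_eq_self_of_nodup _ hn).symm
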